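-- pv_equiv track=rewrite | github.com/Stevelet/children-and-recommender-systems | analysis/full_text_names_and_pronouns.py | analyse_line_pronouns
-- ===== SOURCE A (Python) =====
-- basic_pronouns = ['he', 'him', 'himself', 'his', 'she', 'her', 'hers', 'herself']
--
-- def analyse_line_pronouns(line):
--     words = filter(lambda w: w.isalpha(), line.split(' '))
--
--     pronoun_map = {key: 0 for key in basic_pronouns}
--
--     for word in words:
--         low = word.lower()
--         if low in basic_pronouns:
--             pronoun_map[low] += 1
--
--     return pronoun_map
-- ===== SOURCE B (Python) =====
-- basic_pronouns = ['he', 'him', 'himself', 'his', 'she', 'her', 'hers', 'herself']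
--
-- def analyse_line_pronouns(line):
--     # No counting dict at all: for each of the eight fixed pronouns, count the
--     # alphabetic words of the line whose lowercase form equals it.
--     words = [w for w in line.split(' ') if w.isalpha()]
--     return {p: sum(1 for w in words if w.lower() == p) for p in basic_pronouns}
-- ===== Notes on version B (the rewrite author's own statement) =====
-- stated objective: alternative
-- what changed: B drops the mutable counting dict entirely: it builds the result by, for each of the eight fixed pronouns, counting the alphabetic words whose lowercase form equals that pronoun (one comprehension per key), instead of A's single loop that membership-tests each word and increments a zero-seeded map.
import Mathlib
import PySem

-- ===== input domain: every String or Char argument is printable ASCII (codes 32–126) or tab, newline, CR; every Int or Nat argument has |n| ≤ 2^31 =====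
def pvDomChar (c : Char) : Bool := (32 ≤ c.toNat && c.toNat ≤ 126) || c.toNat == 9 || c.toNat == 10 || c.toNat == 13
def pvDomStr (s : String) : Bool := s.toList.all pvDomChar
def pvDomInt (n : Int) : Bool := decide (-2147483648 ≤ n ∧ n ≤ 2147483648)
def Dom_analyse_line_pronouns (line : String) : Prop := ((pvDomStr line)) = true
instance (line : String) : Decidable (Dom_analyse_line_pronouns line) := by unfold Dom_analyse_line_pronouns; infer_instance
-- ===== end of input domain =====

-- B drops the counting dict: for each fixed pronoun it counts the alphabetic words whose
-- lowercase form equals it, instead of A's membership-test-and-increment map (objective: alternative).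

def basic_pronouns : List String := ["he", "him", "himself", "his", "she", "her", "hers", "herself"]

-- ===== PORT A =====
def analyse_line_pronouns (line : String) : List (String × Int) :=
  -- words = filter(lambda w: w.isalpha(), line.split(' '))   (sep " " ≠ "", so split? is `some`)
  let words := ((PySem.Str.split? line " ").getD []).filter (fun w => PySem.Str.strIsalpha w)
  -- pronoun_map = {key: 0 for key in basic_pronouns}
  let pronoun_map := basic_pronouns.foldl (fun d key => d.insert key 0)
      (PySem.Dict.empty (κ := String) (ν := Int))
  -- for word in words: low = word.lower(); if low in basic_pronouns: pronoun_map[low] += 1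
  -- (the key is present whenever the branch fires, so += is exactly `modify low 0 (· + 1)`)
  let final := words.foldl (fun d word =>
      if basic_pronouns.contains (PySem.Str.lower word)
      then d.modify (PySem.Str.lower word) 0 (· + 1) else d) pronoun_map
  final.items

-- ===== PORT B =====
def analyse_line_pronouns_alt (line : String) : List (String × Int) :=
  -- words = [w for w in line.split(' ') if w.isalpha()]
  let words := ((PySem.Str.split? line " ").getD []).filter (fun w => PySem.Str.strIsalpha w)
  -- {p: sum(1 for w in words if w.lower() == p) for p in basic_pronouns}
  basic_pronouns.map (fun p =>
    (p, words.foldl (fun acc w => if PySem.Str.lower w == p then acc + 1 else acc) (0 : Int)))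

-- ===== PRECONDITION & SPEC =====
def Spec_analyse_line_pronouns (line : String) (out : List (String × Int)) : Prop := out = analyse_line_pronouns_alt line
instance (line : String) (out : List (String × Int)) : Decidable (Spec_analyse_line_pronouns line out) := by unfold Spec_analyse_line_pronouns; infer_instance

-- ===== CLAIM (what is proved, stated in full; the proofs are below) =====
def Claim_equal_analyse_line_pronouns : Prop := ∀ (line : String), Dom_analyse_line_pronouns line → Spec_analyse_line_pronouns line (analyse_line_pronouns line)

-- ===== LEMMAS AND PROOFS =====

-- the zero-seeded comprehension looks up to 0 at every key
lemma getD_seed (ks : List String) : ∀ (d : PySem.Dict String Int) (p : String),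
    d.getD p 0 = 0 → (ks.foldl (fun d key => d.insert key 0) d).getD p 0 = 0 := by
  induction ks with
  | nil => intro d p h; simpa using h
  | cons k ks ih =>
      intro d p h
      simp only [List.foldl_cons]
      apply ih
      by_cases hpk : p = k
      · subst hpk; simp [PySem.Dict.getD_insert_self]
      · rw [PySem.Dict.getD_insert_of_ne _ _ _ hpk]; exact h

-- A's loop never changes the key list (it only modifies keys already present)
lemma keys_loopA (ws : List String) : ∀ (d : PySem.Dict String Int),
    (∀ p ∈ basic_pronouns, p ∈ d.keys) →
    (ws.foldl (fun d word =>
      if basic_pronouns.contains (PySem.Str.lower word)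
      then d.modify (PySem.Str.lower word) 0 (· + 1) else d) d).keys = d.keys := by
  induction ws with
  | nil => intro d _; rfl
  | cons w ws ih =>
      intro d hd
      simp only [List.foldl_cons]
      by_cases hb : basic_pronouns.contains (PySem.Str.lower w)
      · have hmem : PySem.Str.lower w ∈ d.keys := hd _ (by simpa using hb)
        have hc : d.contains (PySem.Str.lower w) = true :=
          (PySem.Dict.contains_iff_mem_keys d _).mpr hmem
        have hkeys : (d.modify (PySem.Str.lower w) 0 (· + 1)).keys = d.keys := by
          rw [PySem.Dict.keys_modify, PySem.Dict.keys_insert_of_contains _ _ hc]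
        rw [if_pos hb, ih _ (by rw [hkeys]; exact hd), hkeys]
      · rw [if_neg hb, ih _ hd]

-- A's loop counts, at each pronoun key, the lowercased words equal to it
lemma getD_loopA (ws : List String) : ∀ (d : PySem.Dict String Int) (v : String),
    v ∈ basic_pronouns →
    (ws.foldl (fun d word =>
      let low := PySem.Str.lower word
      if basic_pronouns.contains low then d.modify low 0 (· + 1) else d) d).getD v 0
      = d.getD v 0 + ((ws.map PySem.Str.lower).count v : Int) := by
  induction ws with
  | nil => intro d v _; simp
  | cons w ws ih =>
      intro d v hv
      simp only [List.foldl_cons, List.map_cons, List.count_cons]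
      by_cases hb : basic_pronouns.contains (PySem.Str.lower w) = true
      · rw [if_pos hb, ih _ _ hv, PySem.Dict.getD_modify]
        by_cases hvw : v = PySem.Str.lower w
        · rw [if_pos hvw, hvw, beq_self_eq_true, if_pos rfl]
          push_cast
          ring
        · have hne : (PySem.Str.lower w == v) = false :=
            beq_eq_false_iff_ne.mpr (fun h => hvw h.symm)
          rw [if_neg hvw, hne, if_neg (by simp)]
          push_cast
          ring
      · have hne : (PySem.Str.lower w == v) = false := by
          by_cases h : PySem.Str.lower w = v
          · exact absurd (by rw [h]; exact List.contains_iff_mem.mpr hv) hb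
          · exact beq_eq_false_iff_ne.mpr h
        rw [if_neg hb, ih _ _ hv, hne, if_neg (by simp)]
        push_cast
        ring

-- B's per-pronoun fold counts the lowercased words equal to that pronoun
lemma foldB_count (ws : List String) : ∀ (acc : Int) (p : String),
    ws.foldl (fun acc w => if PySem.Str.lower w == p then acc + 1 else acc) acc
      = acc + ((ws.map PySem.Str.lower).count p : Int) := by
  induction ws with
  | nil => intro acc p; simp
  | cons w ws ih =>
      intro acc p
      simp only [List.foldl_cons, List.map_cons, List.count_cons]
      by_cases h : (PySem.Str.lower w == p) = true
      · rw [if_pos h, ih, if_pos h]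
        push_cast; ring
      · rw [if_neg h, ih, if_neg h]
        push_cast; ring

theorem analyse_line_pronouns_eq (line : String) :
    analyse_line_pronouns line = analyse_line_pronouns_alt line := by
  unfold analyse_line_pronouns analyse_line_pronouns_alt
  set ws := ((PySem.Str.split? line " ").getD []).filter (fun w => PySem.Str.strIsalpha w) with hws
  set d0 := basic_pronouns.foldl (fun d key => d.insert key 0)
      (PySem.Dict.empty (κ := String) (ν := Int)) with hd0
  -- seed dict: keys are exactly the pronouns, every value 0
  have hkeys0 : d0.keys = basic_pronouns := by
    rw [hd0, PySem.Dict.keys_foldl_insert (f := fun _ _ => (0 : Int)), PySem.Dict.keys_empty]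
    decide
  have hmem0 : ∀ p ∈ basic_pronouns, p ∈ d0.keys := by rw [hkeys0]; exact fun p hp => hp
  set final := ws.foldl (fun d word =>
      if basic_pronouns.contains (PySem.Str.lower word)
      then d.modify (PySem.Str.lower word) 0 (· + 1) else d) d0 with hfinal
  have hkeysF : final.keys = basic_pronouns := by
    rw [hfinal, keys_loopA ws d0 hmem0, hkeys0]
  have hnodup : final.keys.Nodup := by rw [hkeysF]; decide
  rw [PySem.Dict.items_eq_map_keys final hnodup 0, hkeysF]
  apply List.map_congr_left
  intro p hp
  have hA : final.getD p 0 = ((ws.map PySem.Str.lower).count p : Int) := by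
    rw [hfinal, getD_loopA ws d0 p hp, hd0, getD_seed basic_pronouns _ p (by simp)]
    ring
  rw [hA, foldB_count]
  ring

-- ===== VERDICT (by name: the statement is the Claim_ definition above) =====
theorem analyse_line_pronouns_spec : Claim_equal_analyse_line_pronouns := by
  intro line _
  exact analyse_line_pronouns_eq line
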